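-- pv_equiv track=rewrite | github.com/salvador-dali/algorithms_math | __library/_combinatorics.py | conjugate_young_diagram
-- ===== SOURCE A (Python) =====
-- from bisect import bisect_right, bisect_left
--
-- def conjugate_young_diagram(arr):
--     """Return a conjugate young diagram. Can be done by counting by columns instead of rows
--     Can be done
--     https://www.coursera.org/learn/modern-combinatorics/lecture/A3arj/5-8-dvoistviennaia-diaghramma-iungha
--     """
--     arr.sort()
--     conjugate, i = [], 1
--
--     while True:
--         el = len(arr) - bisect_left(arr, i)
--         i += 1
--         if not el:
--             break
--         conjugate.append(el)
--
--     return conjugate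
-- ===== SOURCE B (Python) =====
-- def conjugate_young_diagram(arr):
--     # Histogram + ascending suffix-count walk, no sorting.
--     # (Unlike A, this does not sort `arr` in place; return value is identical.)
--     m = 0
--     for x in arr:
--         if x > m:
--             m = x
--     cnt = {}
--     npos = 0
--     for x in arr:
--         if x > 0:
--             cnt[x] = cnt.get(x, 0) + 1
--             npos += 1
--     res = []
--     s = npos
--     for i in range(1, m + 1):
--         res.append(s)
--         s -= cnt.get(i, 0)
--     return res
-- ===== Notes on version B (the rewrite author's own statement) =====
-- stated objective: alternative
-- what changed: Replaced sort + repeated bisect_left probes (one per output column) by a single-pass histogram of the positive values and an ascending walk that maintains the running count of elements >= i, removing the sort entirely; O(n+M) arithmetic instead of O((n+M) log n), though not measurably faster in CPython where sort/bisect are C-coded.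
import Mathlib
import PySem

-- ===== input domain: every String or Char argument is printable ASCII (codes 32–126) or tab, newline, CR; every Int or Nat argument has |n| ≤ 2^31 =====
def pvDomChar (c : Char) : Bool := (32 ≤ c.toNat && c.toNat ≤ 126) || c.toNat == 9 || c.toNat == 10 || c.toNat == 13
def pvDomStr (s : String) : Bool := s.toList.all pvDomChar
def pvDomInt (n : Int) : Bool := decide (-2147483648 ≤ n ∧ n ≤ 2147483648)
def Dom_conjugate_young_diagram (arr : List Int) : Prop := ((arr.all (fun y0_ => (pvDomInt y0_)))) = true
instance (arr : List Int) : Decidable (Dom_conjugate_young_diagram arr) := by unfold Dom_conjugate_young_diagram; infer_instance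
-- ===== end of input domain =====

-- B replaces A's sort + per-column bisect_left probes by a histogram of the positive
-- values and one ascending walk maintaining the running count (objective: alternative algorithm).
-- Note: A sorts `arr` in place; the equivalence proved here is about the return value only.

-- ===== PORT A =====
-- A's `while True` loop; the fuel argument is a termination guard only
-- (max(arr,0)+1 iterations always suffice, proved below); it changes no computed value.
def cyLoopA (s : List Int) (i : Int) (fuel : Nat) (acc : List Int) : List Int :=
  match fuel with
  | 0 => acc
  | f + 1 =>
    let el : Nat := s.length - PySem.List.bisectLeft s i
    if el = 0 then acc
    else cyLoopA s (i + 1) f (acc ++ [(el : Int)])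

def conjugate_young_diagram (arr : List Int) : List Int :=
  cyLoopA (PySem.List.sorted arr id) 1 ((arr.foldl max 0).toNat + 1) []

-- ===== PORT B =====
def conjugate_young_diagram_alt (arr : List Int) : List Int :=
  -- m = 0; for x in arr: if x > m: m = x
  let m : Int := arr.foldl (fun m x => if x > m then x else m) 0
  -- cnt = {}; npos = 0; for x in arr: if x > 0: cnt[x] = cnt.get(x,0)+1; npos += 1
  let p : PySem.Dict Int Int × Int :=
    arr.foldl (fun st x =>
      if x > 0 then (st.1.modify x 0 (· + 1), st.2 + 1) else st) (∅, 0)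
  -- res = []; s = npos; for i in range(1, m+1): res.append(s); s -= cnt.get(i, 0)
  ((PySem.List.pyRange 1 (m + 1) 1).foldl
    (fun (st : List Int × Int) i => (st.1 ++ [st.2], st.2 - p.1.getD i 0))
    ([], p.2)).1

-- ===== PRECONDITION & SPEC =====
def Spec_conjugate_young_diagram (arr : List Int) (out : List Int) : Prop := out = conjugate_young_diagram_alt arr
instance (arr : List Int) (out : List Int) : Decidable (Spec_conjugate_young_diagram arr out) := by unfold Spec_conjugate_young_diagram; infer_instance

-- ===== CLAIM (what is proved, stated in full; the proofs are below) =====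
def Claim_equal_conjugate_young_diagram : Prop := ∀ (arr : List Int), Dom_conjugate_young_diagram arr → Spec_conjugate_young_diagram arr (conjugate_young_diagram arr)

-- ===== LEMMAS AND PROOFS =====

-- number of elements ≥ i ("column i of the conjugate diagram")
def cge (arr : List Int) (i : Int) : Nat := arr.countP (fun x => decide (i ≤ x))

theorem cge_succ (arr : List Int) (i : Int) :
    cge arr i = arr.count i + cge arr (i + 1) := by
  induction arr with
  | nil => rfl
  | cons x t ih =>
    simp only [cge, List.countP_cons, List.count_cons, beq_iff_eq] at *
    split_ifs <;> simp only [decide_eq_true_eq] at * <;> omega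

theorem cge_zero_of_all_le (arr : List Int) (M : Int)
    (h : ∀ x ∈ arr, x ≤ M) : cge arr (M + 1) = 0 := by
  rw [cge, List.countP_eq_zero]
  intro a ha
  simpa using by have := h a ha; omega

-- the Int maximum fold: value, membership, bound
theorem foldl_max_mem (arr : List Int) (a : Int) :
    arr.foldl max a = a ∨ arr.foldl max a ∈ arr := by
  induction arr generalizing a with
  | nil => left; rfl
  | cons x t ih =>
    rcases ih (max a x) with h | h
    · rcases max_choice a x with hm | hm
      · left; rw [List.foldl_cons, h, hm]
      · right; rw [List.foldl_cons, h, hm]; exact List.mem_cons_self ..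
    · right; exact List.mem_cons_of_mem _ h

theorem cge_pos (arr : List Int) (i : Int) (h1 : 1 ≤ i)
    (h2 : i ≤ arr.foldl max 0) : 0 < cge arr i := by
  rcases foldl_max_mem arr 0 with h | h
  · omega
  · have : (fun x => decide (i ≤ x)) (arr.foldl max 0) = true := by simpa using h2
    have := List.countP_pos_iff (p := fun x => decide (i ≤ x)) (l := arr) |>.2
      ⟨_, h, this⟩
    simpa [cge] using this

-- A's probe: len(arr) - bisect_left(arr, i) counts the elements ≥ i
theorem sub_bisect (arr : List Int) (i : Int) :
    (PySem.List.sorted arr id).length -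
      PySem.List.bisectLeft (PySem.List.sorted arr id) i = cge arr i := by
  set s := PySem.List.sorted arr id with hs
  have hpw : List.Pairwise (fun a b : Int => a ≤ b) s := by
    simpa using PySem.List.sorted_pairwise arr id
  obtain ⟨hk, hlt, hge⟩ := PySem.List.bisectLeft_spec s i hpw
  set k := PySem.List.bisectLeft s i with hkdef
  have hperm : s.Perm arr := PySem.List.sorted_perm arr id false
  have hc : cge arr i = s.countP (fun x => decide (i ≤ x)) := by
    rw [cge, hperm.countP_eq]
  rw [hc]
  have hsplit : s.countP (fun x => decide (i ≤ x)) =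
      (s.take k).countP (fun x => decide (i ≤ x)) +
      (s.drop k).countP (fun x => decide (i ≤ x)) := by
    conv_lhs => rw [← List.take_append_drop k s]
    rw [List.countP_append]
  have htake : (s.take k).countP (fun x => decide (i ≤ x)) = 0 := by
    rw [List.countP_eq_zero]
    intro a ha
    obtain ⟨j, hj, rfl⟩ := List.mem_iff_getElem.1 ha
    have hjk : j < k := lt_of_lt_of_le hj (by simp)
    have := hlt j (by simp at hj; omega) hjk
    simp only [List.getElem_take]
    simpa using by omega
  have hdrop : (s.drop k).countP (fun x => decide (i ≤ x)) = (s.drop k).length := by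
    rw [List.countP_eq_length]
    intro a ha
    obtain ⟨j, hj, rfl⟩ := List.mem_iff_getElem.1 ha
    rw [List.getElem_drop]
    have := hge (k + j) (by simp at hj; omega) (by omega)
    simpa using this
  rw [hsplit, htake, hdrop, List.length_drop]
  omega

-- A's loop, run with enough fuel, produces the canonical column list
theorem cyLoopA_eq (arr : List Int) :
    ∀ (f : Nat) (i : Int) (acc : List Int), 1 ≤ i → i ≤ arr.foldl max 0 + 1 →
      (arr.foldl max 0 + 1 - i).toNat + 1 ≤ f →
      cyLoopA (PySem.List.sorted arr id) i f acc =
        acc ++ (PySem.List.pyRange i (arr.foldl max 0 + 1) 1).map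
          (fun j => (cge arr j : Int)) := by
  intro f
  induction f with
  | zero => intro i acc _ _ hf; omega
  | succ f ih =>
    intro i acc h1 h2 _
    set M := arr.foldl max 0 with hM
    rw [cyLoopA]
    simp only [sub_bisect arr i]
    by_cases hi : i = M + 1
    · subst hi
      have hz : cge arr (M + 1) = 0 :=
        cge_zero_of_all_le arr M (fun x hx => (PySem.List.le_foldl_max arr 0).2 x hx)
      have hr : PySem.List.pyRange (M + 1) (M + 1) 1 = [] := by
        rw [PySem.List.pyRange_of_pos _ _ one_pos]; simp
      simp [hz, hr]
    · have hiM : i ≤ M := by omega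
      have hpos : 0 < cge arr i := cge_pos arr i h1 hiM
      rw [if_neg (by omega)]
      rw [ih (i + 1) (acc ++ [(cge arr i : Int)]) (by omega) (by omega) (by omega)]
      rw [PySem.List.pyRange_one_cons (by omega : i < M + 1)]
      simp

-- B's histogram: cnt.get(i, 0) = multiplicity of i among the positive elements
theorem cnt_getD (arr : List Int) (i : Int) (hi : 1 ≤ i) :
    (arr.foldl (fun d x => if x > 0 then d.modify x 0 (· + 1) else d)
      (∅ : PySem.Dict Int Int)).getD i 0 = (arr.count i : Int) := by
  have hfun : (fun (d : PySem.Dict Int Int) (x : Int) =>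
      if x > 0 then d.modify x 0 (· + 1) else d) =
      fun d x => if (fun y : Int => decide (y > 0)) x = true
        then d.modify x 0 (· + 1) else d := by
    funext d x; by_cases h : x > 0 <;> simp [h]
  rw [hfun, ← List.foldl_filter, PySem.Dict.getD_foldl_modify_add_one]
  rw [List.count_filter (by simpa using by omega)]
  have h0 : (∅ : PySem.Dict Int Int).getD i 0 = 0 := rfl
  rw [h0, zero_add]

-- B's walk: starting from the count of elements ≥ i, it emits exactly the columns i..M
theorem walkB_eq (arr : List Int) (M : Int) :
    ∀ (n : Nat) (i : Int) (acc : List Int), 1 ≤ i → i ≤ M + 1 → n = (M + 1 - i).toNat →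
      ((PySem.List.pyRange i (M + 1) 1).foldl
        (fun (st : List Int × Int) j =>
          (st.1 ++ [st.2], st.2 -
            (arr.foldl (fun d x => if x > 0 then d.modify x 0 (· + 1) else d)
              (∅ : PySem.Dict Int Int)).getD j 0))
        (acc, (cge arr i : Int))).1 =
      acc ++ (PySem.List.pyRange i (M + 1) 1).map (fun j => (cge arr j : Int)) := by
  intro n
  induction n with
  | zero =>
    intro i acc h1 h2 hn
    have : i = M + 1 := by omega
    simp [this, PySem.List.pyRange]
  | succ n ih =>
    intro i acc h1 h2 hn
    have hiM : i < M + 1 := by omega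
    rw [PySem.List.pyRange_one_cons hiM]
    simp only [List.foldl_cons, List.map_cons]
    have hstep : (cge arr i : Int) - (arr.foldl
        (fun d x => if x > 0 then d.modify x 0 (· + 1) else d)
        (∅ : PySem.Dict Int Int)).getD i 0 = (cge arr (i + 1) : Int) := by
      rw [cnt_getD arr i h1]
      have := cge_succ arr i
      push_cast [this]
      ring
    rw [hstep, ih (i + 1) (acc ++ [(cge arr i : Int)]) (by omega) (by omega) (by omega)]
    simp

-- the two maximum folds compute the same value
theorem foldl_if_max (arr : List Int) :
    arr.foldl (fun m x => if x > m then x else m) 0 = arr.foldl max 0 := by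
  have : (fun (m x : Int) => if x > m then x else m) = fun m x => max m x := by
    funext m x; split_ifs <;> omega
  rw [this]

-- the pair fold splits into the histogram fold and the positive count
theorem pairfold_split (arr : List Int) :
    arr.foldl (fun (st : PySem.Dict Int Int × Int) x =>
        if x > 0 then (st.1.modify x 0 (· + 1), st.2 + 1) else st)
      ((∅ : PySem.Dict Int Int), 0) =
    (arr.foldl (fun d x => if x > 0 then d.modify x 0 (· + 1) else d)
        (∅ : PySem.Dict Int Int),
     arr.foldl (fun n x => if x > 0 then n + 1 else n) (0 : Int)) := by
  have h2 := PySem.List.foldl_prod_mk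
    (fun (d : PySem.Dict Int Int) (y : Int) => if y > 0 then d.modify y 0 (· + 1) else d)
    (fun (n : Int) (y : Int) => if y > 0 then n + 1 else n) arr ∅ 0
  rw [← h2]
  congr 1
  funext st x
  by_cases h : x > 0
  · rw [if_pos h]; simp [h]
  · rw [if_neg h]; simp [h]

theorem npos_eq (arr : List Int) :
    arr.foldl (fun n x => if x > 0 then n + 1 else n) (0 : Int) = (cge arr 1 : Int) := by
  have hfun : (fun (n : Int) (x : Int) => if x > 0 then n + 1 else n) =
      fun n x => if (fun y : Int => decide (y > 0)) x = true then n + 1 else n := by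
    funext n x; by_cases h : x > 0 <;> simp [h]
  rw [hfun, PySem.List.foldl_count_if, zero_add, cge]
  exact congrArg Nat.cast (List.countP_congr (fun x _ => by simp; omega))

-- ===== VERDICT (by name: the statement is the Claim_ definition above) =====
theorem conjugate_young_diagram_spec : Claim_equal_conjugate_young_diagram := by
  unfold Claim_equal_conjugate_young_diagram Spec_conjugate_young_diagram
  intro arr _
  rw [conjugate_young_diagram]
  have halt : conjugate_young_diagram_alt arr =
      ((PySem.List.pyRange 1 (arr.foldl (fun m x => if x > m then x else m) 0 + 1) 1).foldl
        (fun (st : List Int × Int) i => (st.1 ++ [st.2], st.2 -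
          (arr.foldl (fun (st : PySem.Dict Int Int × Int) x =>
            if x > 0 then (st.1.modify x 0 (· + 1), st.2 + 1) else st) (∅, 0)).1.getD i 0))
        ([], (arr.foldl (fun (st : PySem.Dict Int Int × Int) x =>
            if x > 0 then (st.1.modify x 0 (· + 1), st.2 + 1) else st) (∅, 0)).2)).1 := rfl
  rw [halt]
  simp only [foldl_if_max, pairfold_split, npos_eq]
  have hM0 : 0 ≤ arr.foldl max 0 := (PySem.List.le_foldl_max arr 0).1
  rw [cyLoopA_eq arr ((arr.foldl max 0).toNat + 1) 1 [] (by omega) (by omega) (by omega)]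
  rw [walkB_eq arr (arr.foldl max 0) (arr.foldl max 0).toNat 1 [] (by omega) (by omega)
    (by omega)]
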